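-- pv_equiv track=rewrite | github.com/kh277/BOJ | 백준/Silver/12034. 김인천씨의 식료품가게 （Large）/김인천씨의 식료품가게 （Large）.py | solve
-- ===== SOURCE A (Python) =====
-- def solve(N: int, cost: list) -> list:
--     cost.sort()
--     visited = [False for _ in range(N*2)]     # 방문처리
--     discount = []       # 할인가격
--
--     for i in range(N*2):
--         if visited[i] == True:
--             continue
--
--         # 방문하지 않은 점 방문 표시
--         discount.append(cost[i])
--         visited[i] = True
--
--         # 원가에 해당하는 값 처리
--         for j in range(N*2):
--             if cost[j] == cost[i]*4//3 and visited[j] == False: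
--                 visited[j] = True
--                 break
--
--     return discount
-- ===== SOURCE B (Python) =====
-- def _rle(xs):
--     # run-length encoding of xs: [(value, run length)] for each maximal run
--     blocks = []
--     i = 0
--     n = len(xs)
--     while i < n:
--         v = xs[i]
--         j = i + 1
--         while j < n and xs[j] == v:
--             j += 1
--         blocks.append((v, j - i))
--         i = j
--     return blocks
--
--
-- def solve(N: int, cost: list) -> list:
--     cost.sort()
--     items = [cost[i] for i in range(2 * N)]
--     blocks = _rle(items)
--     rem = {}
--     for (v, c) in blocks:
--         rem[v] = c
--     discount = []
--     for (v, c) in blocks: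
--         e = rem[v]
--         if e == 0:
--             continue
--         rem[v] = 0
--         t = v * 4 // 3
--         if t == v:
--             discount += [v] * ((e + 1) // 2)
--         else:
--             discount += [v] * e
--             r = rem.get(t, 0)
--             if r > 0:
--                 rem[t] = r - min(e, r)
--     return discount
-- ===== Notes on version B (the rewrite author's own statement) =====
-- stated objective: faster
-- what changed: A walks every element and, per emitted element, rescans all 2N positions with a visited-flag array (O(N^2)); B sorts, run-length-encodes the sorted prefix into (value,count) blocks once, and processes each distinct value as a whole block with count arithmetic (emit all remaining copies of v, or ceil/2 when v*4//3 == v, and subtract min(e, remaining) from the target block), so there is no per-element inner work at all.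
import Mathlib
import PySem

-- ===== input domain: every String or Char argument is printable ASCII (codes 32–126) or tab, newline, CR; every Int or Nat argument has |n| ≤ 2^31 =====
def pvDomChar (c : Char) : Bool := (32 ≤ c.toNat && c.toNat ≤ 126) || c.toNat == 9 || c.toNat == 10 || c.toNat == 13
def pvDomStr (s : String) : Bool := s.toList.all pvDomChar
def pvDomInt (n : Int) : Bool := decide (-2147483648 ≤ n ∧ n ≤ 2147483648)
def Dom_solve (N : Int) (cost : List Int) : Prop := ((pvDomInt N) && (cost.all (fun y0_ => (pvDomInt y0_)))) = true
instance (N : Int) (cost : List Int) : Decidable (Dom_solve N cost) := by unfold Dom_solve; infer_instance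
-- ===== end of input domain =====

-- B replaces A's quadratic visited-array double scan by run-length-encoding the sorted prefix and
-- processing each distinct value as one block with count arithmetic; both ports' Pythons, like A,
-- sort the argument list in place (the equivalence proved here is about the return value).


-- ===== PORT A =====
-- inner loop 'for j in range(N*2): if cost[j] == t and visited[j] == False: visited[j] = True; break'
def solveMark (cs : List Int) (t : Int) (js : List Int) (visited : List Bool) : List Bool :=
  match js with
  | [] => visited
  | j :: rest =>
      if (PySem.List.pyGetD cs j 0 == t) && (PySem.List.pyGetD visited j true == false) then
        PySem.List.pySetD visited j true
      else solveMark cs t rest visited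

-- outer loop 'for i in range(N*2): …'
def solveLoop (cs : List Int) (n2 : Int) (is : List Int) (visited : List Bool) (disc : List Int) :
    List Int :=
  match is with
  | [] => disc
  | i :: rest =>
      if PySem.List.pyGetD visited i false == true then
        solveLoop cs n2 rest visited disc
      else
        let disc' := disc ++ [PySem.List.pyGetD cs i 0]
        let visited' := PySem.List.pySetD visited i true
        let visited'' :=
          solveMark cs (PySem.Int.floordiv (PySem.List.pyGetD cs i 0 * 4) 3)
            (PySem.List.pyRange 0 n2 1) visited'
        solveLoop cs n2 rest visited'' disc'

def solve (N : Int) (cost : List Int) : List Int :=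
  let cs := PySem.List.sorted cost (fun x => x) false
  let visited := (PySem.List.pyRange 0 (N * 2) 1).map (fun _ => false)
  solveLoop cs (N * 2) (PySem.List.pyRange 0 (N * 2) 1) visited []

-- ===== PORT B =====
-- inner while of _rle: 'j = i + 1; while j < n and xs[j] == v: j += 1' — counts the leading
-- elements of the suffix after position i that equal v
def rleCount (v : Int) : List Int → Nat
  | [] => 0
  | x :: xs => if x == v then rleCount v xs + 1 else 0

-- outer while of _rle over the remaining suffix; appends (value, run length) per maximal run
def rle : List Int → List (Int × Int)
  | [] => []
  | v :: xs => (v, ((rleCount v xs + 1 : Nat) : Int)) :: rle (xs.drop (rleCount v xs))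
  termination_by xs => xs.length
  decreasing_by
    simp only [List.length_cons, List.length_drop]
    omega

-- main loop 'for (v, c) in blocks: …'; 'rem[v]' is read only where v is a present key, so getD is exact
def altLoop (rem : PySem.Dict Int Int) (disc : List Int) (bs : List (Int × Int)) : List Int :=
  match bs with
  | [] => disc
  | (v, _) :: bs =>
      let e := rem.getD v 0
      if e == 0 then altLoop rem disc bs
      else
        let rem1 := rem.insert v 0
        let t := PySem.Int.floordiv (v * 4) 3
        if t == v then
          altLoop rem1 (disc ++ List.replicate (PySem.Int.floordiv (e + 1) 2).toNat v) bs
        else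
          let disc' := disc ++ List.replicate e.toNat v
          let r := rem1.getD t 0
          if r > 0 then altLoop (rem1.insert t (r - min e r)) disc' bs
          else altLoop rem1 disc' bs

def solve_alt (N : Int) (cost : List Int) : List Int :=
  let cs := PySem.List.sorted cost (fun x => x) false
  let items := (PySem.List.pyRange 0 (2 * N) 1).map (fun i => PySem.List.pyGetD cs i 0)
  let blocks := rle items
  let rem := blocks.foldl (fun d p => d.insert p.1 p.2) PySem.Dict.empty
  altLoop rem [] blocks

-- ===== PRECONDITION & SPEC =====
-- Pre_: A raises IndexError (cost[i] for i up to 2N-1) exactly when 2*N > len(cost); nothing else is excluded.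
def Pre_solve (N : Int) (cost : List Int) : Prop := 2 * N ≤ (cost.length : Int)
instance (N : Int) (cost : List Int) : Decidable (Pre_solve N cost) := by
  unfold Pre_solve; infer_instance

def pvWitness_solve : Int × List Int := (2, [4, 3, 4, 3])

def Spec_solve (N : Int) (cost : List Int) (out : List Int) : Prop := out = solve_alt N cost
instance (N : Int) (cost : List Int) (out : List Int) : Decidable (Spec_solve N cost out) := by
  unfold Spec_solve; infer_instance

-- ===== CLAIM (what is proved, stated in full; the proofs are below) =====
def Claim_equal_solve : Prop :=
  ∀ (N : Int) (cost : List Int), Dom_solve N cost → Pre_solve N cost →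
    Spec_solve N cost (solve N cost)

-- ===== LEMMAS AND PROOFS =====

-- Proof-layer model of A: the zipped state (value, visited-flag), scanned structurally.
def markFirst (t : Int) : List (Int × Bool) → List (Int × Bool)
  | [] => []
  | (x, b) :: s => if x = t ∧ b = false then (x, true) :: s else (x, b) :: markFirst t s

theorem markFirst_length (t : Int) (s : List (Int × Bool)) :
    (markFirst t s).length = s.length := by
  induction s with
  | nil => rfl
  | cons p s ih => obtain ⟨x, b⟩ := p; simp only [markFirst]; split <;> simp [ih]

def mloop : List (Int × Bool) → List Int → List Int
  | [], disc => disc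
  | (x, b) :: s, disc =>
      if b then mloop s disc
      else mloop (markFirst (PySem.Int.floordiv (x * 4) 3) s) (disc ++ [x])
  termination_by s _ => s.length
  decreasing_by all_goals simp [markFirst_length]

-- list-removal model shared by both sides
def rloop : List Int → List Int → List Int
  | [], disc => disc
  | v :: r, disc => rloop (r.erase (PySem.Int.floordiv (v * 4) 3)) (disc ++ [v])
  termination_by r _ => r.length
  decreasing_by
    have h : (r.erase (PySem.Int.floordiv (v * 4) 3)).length ≤ r.length := List.length_erase_le
    simp only [List.length_cons]
    omega

-- values at unvisited positions
def restOf (s : List (Int × Bool)) : List Int :=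
  s.filterMap (fun p => if p.2 then none else some p.1)

theorem restOf_cons_true (x : Int) (s : List (Int × Bool)) :
    restOf ((x, true) :: s) = restOf s := by simp [restOf]

theorem restOf_cons_false (x : Int) (s : List (Int × Bool)) :
    restOf ((x, false) :: s) = x :: restOf s := by simp [restOf]

theorem restOf_markFirst (t : Int) (s : List (Int × Bool)) :
    restOf (markFirst t s) = (restOf s).erase t := by
  induction s with
  | nil => rfl
  | cons p s ih =>
      obtain ⟨x, b⟩ := p
      cases b with
      | true => simp [markFirst, restOf_cons_true, ih]
      | false =>
          by_cases hx : x = t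
          · subst hx
            simp [markFirst, restOf_cons_false, restOf_cons_true]
          · simp [markFirst, hx, restOf_cons_false, ih]

theorem restOf_zip_false (ds : List Int) :
    ∀ fl : List Bool, (∀ b ∈ fl, b = false) →
    restOf (ds.zip fl) = ds.take fl.length := by
  induction ds with
  | nil => intro fl _; simp [restOf]
  | cons x ds ih =>
      intro fl h
      cases fl with
      | nil => simp [restOf]
      | cons b fl =>
          have hb : b = false := h b (by simp)
          subst hb
          simp [List.zip_cons_cons, restOf_cons_false, ih fl (fun b hb => h b (by simp [hb]))]

theorem mloop_eq_rloop (s : List (Int × Bool)) (disc : List Int) :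
    mloop s disc = rloop (restOf s) disc := by
  induction s, disc using mloop.induct with
  | case1 disc => simp [mloop, restOf, rloop]
  | case2 x s disc ih =>
      rw [mloop, if_pos rfl, restOf_cons_true, ih]
  | case3 x b s disc hb ih =>
      have hb' : b = false := by simpa using hb
      subst hb'
      rw [mloop, if_neg (by simp), restOf_cons_false, rloop, ← restOf_markFirst, ih]

theorem zip_set_snd (ds : List Int) (fl : List Bool) (i : Nat) (b : Bool)
    (h : ds.length = fl.length) (hi : i < ds.length) :
    ds.zip (fl.set i b) = (ds.zip fl).set i ((ds[i]'hi, b)) := by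
  apply List.ext_getElem
  · simp [h]
  · intro j h1 h2
    by_cases hij : i = j
    · subst hij
      simp [List.getElem_zip]
    · simp [List.getElem_zip, List.getElem_set, hij]

theorem length_solveMark (cs : List Int) (t : Int) :
    ∀ (js : List Int) (visited : List Bool),
    (solveMark cs t js visited).length = visited.length := by
  intro js
  induction js with
  | nil => intro v; rfl
  | cons j js ih =>
      intro v
      rw [solveMark]
      split
      · simp [PySem.List.length_pySetD]
      · exact ih v

theorem solveMark_skip (cs : List Int) (t : Int) :
    ∀ (js ks : List Int) (visited : List Bool),
    (∀ j ∈ js, PySem.List.pyGetD visited j true = true) →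
    solveMark cs t (js ++ ks) visited = solveMark cs t ks visited := by
  intro js
  induction js with
  | nil => intro ks v _; rfl
  | cons j js ih =>
      intro ks v h
      have hj : PySem.List.pyGetD v j true = true := h j (by simp)
      rw [List.cons_append, solveMark, if_neg (by simp [hj])]
      exact ih ks v (fun j hj => h j (by simp [hj]))

theorem solveMark_zip (cs : List Int) (t : Int) (n2 : Nat) (hn2 : n2 ≤ cs.length) :
    ∀ (k i : Nat) (visited : List Bool), i + k = n2 → visited.length = n2 →
    (cs.take n2).zip (solveMark cs t (PySem.List.pyRange (i : Int) (n2 : Int) 1) visited) =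
      ((cs.take n2).zip visited).take i ++ markFirst t (((cs.take n2).zip visited).drop i) := by
  intro k
  induction k with
  | zero =>
      intro i visited hik hlen
      have hzlen : ((cs.take n2).zip visited).length = n2 := by
        simp [hlen, hn2]
      have h1 : ((cs.take n2).zip visited).length ≤ i := by omega
      rw [PySem.List.pyRange_one_eq_nil (by exact_mod_cast (by omega : (n2 : Nat) ≤ i)),
        solveMark, List.drop_eq_nil_of_le h1, List.take_of_length_le h1]
      simp [markFirst]
  | succ k ih =>
      intro i visited hik hlen
      have hilt : i < n2 := by omega
      have hics : i < cs.length := lt_of_lt_of_le hilt hn2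
      have hivis : i < visited.length := by omega
      have hds : (cs.take n2).length = n2 := by simp [hn2]
      have hzlen : ((cs.take n2).zip visited).length = n2 := by simp [hlen, hn2]
      have hiz : i < ((cs.take n2).zip visited).length := by omega
      have hrange : PySem.List.pyRange (i : Int) (n2 : Int) 1 =
          (i : Int) :: PySem.List.pyRange ((i + 1 : Nat) : Int) (n2 : Int) 1 := by
        rw [PySem.List.pyRange_one_cons (by exact_mod_cast hilt)]
        norm_cast
      have hget1 : PySem.List.pyGetD cs (i : Int) 0 = cs[i]'hics := by
        simp [List.getElem?_eq_getElem hics]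
      have hget2 : PySem.List.pyGetD visited (i : Int) true = visited[i]'hivis := by
        simp [List.getElem?_eq_getElem hivis]
      have hzdrop : ((cs.take n2).zip visited).drop i =
          (cs[i]'hics, visited[i]'hivis) :: ((cs.take n2).zip visited).drop (i + 1) := by
        rw [List.drop_eq_getElem_cons hiz]
        congr 1
        simp [List.getElem_zip, List.getElem_take]
      have htakes : ((cs.take n2).zip visited).take (i + 1) =
          ((cs.take n2).zip visited).take i ++ [(cs[i]'hics, visited[i]'hivis)] := by
        rw [List.take_add_one, List.getElem?_eq_getElem hiz]
        simp [List.getElem_zip, List.getElem_take]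
      rw [hrange, solveMark]
      by_cases hb : visited[i]'hivis = true
      · rw [if_neg (by simp [hget2, hb])]
        rw [ih (i + 1) visited (by omega) hlen, hzdrop, htakes]
        simp [markFirst, hb]
      · have hbf : visited[i]'hivis = false := by simpa using hb
        by_cases hxt : cs[i]'hics = t
        · rw [if_pos (by simp [hget1, hget2, hbf, hxt])]
          have hset : PySem.List.pySetD visited (i : Int) true = visited.set i true := by
            simp
          rw [hset, zip_set_snd (cs.take n2) visited i true (by omega) (by omega),
            List.set_eq_take_cons_drop _ (by omega), hzdrop]
          simp [markFirst, hxt, hbf, List.getElem_take]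
        · rw [if_neg (by simp [hget1, hget2, hxt])]
          rw [ih (i + 1) visited (by omega) hlen, hzdrop, htakes]
          simp [markFirst, hxt]

theorem solveLoop_eq_mloop (cs : List Int) (n2 : Nat) (hn2 : n2 ≤ cs.length) :
    ∀ (k i : Nat) (visited : List Bool) (disc : List Int), i + k = n2 →
    visited.length = n2 → (∀ j : Nat, j < i → visited.getD j true = true) →
    solveLoop cs (n2 : Int) (PySem.List.pyRange (i : Int) (n2 : Int) 1) visited disc =
      mloop (((cs.take n2).zip visited).drop i) disc := by
  intro k
  induction k with
  | zero =>
      intro i visited disc hik hlen _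
      have hzlen : ((cs.take n2).zip visited).length = n2 := by simp [hlen, hn2]
      have h1 : ((cs.take n2).zip visited).length ≤ i := by omega
      rw [PySem.List.pyRange_one_eq_nil (by exact_mod_cast (by omega : (n2 : Nat) ≤ i)),
        solveLoop, List.drop_eq_nil_of_le h1, mloop]
  | succ k ih =>
      intro i visited disc hik hlen hpre
      have hilt : i < n2 := by omega
      have hics : i < cs.length := lt_of_lt_of_le hilt hn2
      have hivis : i < visited.length := by omega
      have hds : (cs.take n2).length = n2 := by simp [hn2]
      have hzlen : ((cs.take n2).zip visited).length = n2 := by simp [hlen, hn2]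
      have hiz : i < ((cs.take n2).zip visited).length := by omega
      have hrange : PySem.List.pyRange (i : Int) (n2 : Int) 1 =
          (i : Int) :: PySem.List.pyRange ((i + 1 : Nat) : Int) (n2 : Int) 1 := by
        rw [PySem.List.pyRange_one_cons (by exact_mod_cast hilt)]
        norm_cast
      have hget1 : PySem.List.pyGetD cs (i : Int) 0 = cs[i]'hics := by
        simp [List.getElem?_eq_getElem hics]
      have hget2 : PySem.List.pyGetD visited (i : Int) false = visited[i]'hivis := by
        simp [List.getElem?_eq_getElem hivis]
      have hzdrop : ((cs.take n2).zip visited).drop i =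
          (cs[i]'hics, visited[i]'hivis) :: ((cs.take n2).zip visited).drop (i + 1) := by
        rw [List.drop_eq_getElem_cons hiz]
        congr 1
        simp [List.getElem_zip, List.getElem_take]
      by_cases hb : visited[i]'hivis = true
      · rw [hrange, solveLoop, if_pos (by simp [hget2, hb])]
        rw [ih (i + 1) visited disc (by omega) hlen, hzdrop, hb, mloop, if_pos rfl]
        intro j hj
        rcases Nat.lt_succ_iff_lt_or_eq.mp hj with h | h
        · exact hpre j h
        · subst h
          rw [List.getD_eq_getElem _ _ hivis, hb]
      · have hbf : visited[i]'hivis = false := by simpa using hb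
        have hA : solveLoop cs (n2 : Int) (PySem.List.pyRange (i : Int) (n2 : Int) 1)
              visited disc =
            solveLoop cs (n2 : Int) (PySem.List.pyRange ((i + 1 : Nat) : Int) (n2 : Int) 1)
              (solveMark cs (PySem.Int.floordiv (PySem.List.pyGetD cs (i : Int) 0 * 4) 3)
                (PySem.List.pyRange 0 (n2 : Int) 1) (PySem.List.pySetD visited (i : Int) true))
              (disc ++ [PySem.List.pyGetD cs (i : Int) 0]) := by
          rw [hrange, solveLoop, if_neg (by simp [hget2, hbf])]
        have hset : PySem.List.pySetD visited (i : Int) true = visited.set i true := by simp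
        rw [hA, hget1, hset]
        set t := PySem.Int.floordiv (cs[i]'hics * 4) 3 with hteq
        have hsk : ∀ j ∈ PySem.List.pyRange 0 ((i + 1 : Nat) : Int) 1,
            PySem.List.pyGetD (visited.set i true) j true = true := by
          intro j hj
          obtain ⟨h0j, hjlt⟩ := (PySem.List.mem_pyRange_one).mp hj
          lift j to Nat using h0j
          have hjn : j < i + 1 := by exact_mod_cast hjlt
          have hjv : j < (visited.set i true).length := by simp; omega
          rw [PySem.List.pyGetD_natCast, List.getD_eq_getElem _ _ hjv, List.getElem_set]
          by_cases hji : i = j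
          · simp [hji]
          · have : j < i := by omega
            simp [hji]
            rw [← List.getD_eq_getElem _ true (by omega : j < visited.length)]
            exact hpre j this
        have hsplit : PySem.List.pyRange 0 (n2 : Int) 1 =
            PySem.List.pyRange 0 ((i + 1 : Nat) : Int) 1 ++
            PySem.List.pyRange ((i + 1 : Nat) : Int) (n2 : Int) 1 := by
          rw [PySem.List.pyRange_one_append 0 ((i + 1 : Nat) : Int) (n2 : Int)
            (by positivity) (by exact_mod_cast hilt)]
        rw [hsplit, solveMark_skip cs t _ _ _ hsk]
        have hlen' : (visited.set i true).length = n2 := by simp [hlen]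
        have hzip'' := solveMark_zip cs t n2 hn2 k (i + 1) (visited.set i true)
          (by omega) hlen'
        have hz' : (cs.take n2).zip (visited.set i true) =
            ((cs.take n2).zip visited).set i ((cs.take n2)[i]'(by omega), true) :=
          zip_set_snd (cs.take n2) visited i true (by omega) (by omega)
        have hdrop1 : ((cs.take n2).zip (visited.set i true)).drop (i + 1) =
            ((cs.take n2).zip visited).drop (i + 1) := by
          rw [hz', List.drop_set_of_lt (Nat.lt_succ_self i)]
        have htklen : (((cs.take n2).zip (visited.set i true)).take (i + 1)).length = i + 1 := by
          simp [hlen, hn2]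
          omega
        have hlen'' : (solveMark cs t (PySem.List.pyRange ((i + 1 : Nat) : Int) (n2 : Int) 1)
            (visited.set i true)).length = n2 := by
          rw [length_solveMark]; exact hlen'
        have hdrop'' : ((cs.take n2).zip (solveMark cs t
              (PySem.List.pyRange ((i + 1 : Nat) : Int) (n2 : Int) 1)
              (visited.set i true))).drop (i + 1) =
            markFirst t (((cs.take n2).zip visited).drop (i + 1)) := by
          rw [hzip'', List.drop_left' htklen, hdrop1]
        have hpre'' : ∀ j : Nat, j < i + 1 →
            (solveMark cs t (PySem.List.pyRange ((i + 1 : Nat) : Int) (n2 : Int) 1)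
              (visited.set i true)).getD j true = true := by
          intro j hj
          have hjV : j < (solveMark cs t
              (PySem.List.pyRange ((i + 1 : Nat) : Int) (n2 : Int) 1)
              (visited.set i true)).length := by
            rw [length_solveMark, List.length_set]; omega
          have hjset : j < (visited.set i true).length := by
            rw [List.length_set]; omega
          have hjds : j < (cs.take n2).length := by omega
          have hjtk : j < (((cs.take n2).zip (visited.set i true)).take (i + 1)).length := by
            rw [htklen]; omega
          have hjz2 : j < ((cs.take n2).zip (visited.set i true)).length := by
            rw [List.length_zip]; omega
          have hjz1 : j < ((cs.take n2).zip (solveMark cs t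
              (PySem.List.pyRange ((i + 1 : Nat) : Int) (n2 : Int) 1)
              (visited.set i true))).length := by
            rw [List.length_zip]; omega
          have e1 : ((cs.take n2).zip (solveMark cs t
              (PySem.List.pyRange ((i + 1 : Nat) : Int) (n2 : Int) 1)
              (visited.set i true)))[j]'hjz1 =
              ((cs.take n2).zip (visited.set i true))[j]'hjz2 := by
            rw [List.getElem_of_eq hzip'' hjz1, List.getElem_append_left hjtk,
              List.getElem_take]
          simp only [List.getElem_zip, Prod.ext_iff] at e1
          rw [List.getD_eq_getElem _ _ hjV, e1.2, List.getElem_set]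
          by_cases hji : i = j
          · simp [hji]
          · simp only [hji, if_false]
            rw [← List.getD_eq_getElem _ true (show j < visited.length by omega)]
            exact hpre j (by omega)
        rw [ih (i + 1) _ (disc ++ [cs[i]'hics]) (by omega) hlen'' hpre'']
        rw [hdrop'', hzdrop, hbf, mloop, if_neg (by simp)]

-- ===== B-side lemmas =====

-- expansion of a block list back to the element list
def expand : List (Int × Int) → List Int
  | [] => []
  | (v, c) :: bs => List.replicate c.toNat v ++ expand bs

-- erase t applied e times
def eraseN (t : Int) : Nat → List Int → List Int
  | 0, l => l
  | e + 1, l => eraseN t e (l.erase t)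

theorem eraseN_sublist (t : Int) (e : Nat) (l : List Int) : (eraseN t e l).Sublist l := by
  induction e generalizing l with
  | zero => exact List.Sublist.refl l
  | succ e ih => exact (ih (l.erase t)).trans (List.erase_sublist)

theorem eraseN_count_self (t : Int) (e : Nat) (l : List Int) :
    (eraseN t e l).count t = l.count t - min e (l.count t) := by
  induction e generalizing l with
  | zero => simp [eraseN]
  | succ e ih =>
      rw [eraseN, ih, List.count_erase_self]
      omega

theorem eraseN_count_ne (t u : Int) (hu : u ≠ t) (e : Nat) (l : List Int) :
    (eraseN t e l).count u = l.count u := by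
  induction e generalizing l with
  | zero => rfl
  | succ e ih => rw [eraseN, ih, List.count_erase_of_ne hu]

theorem eraseN_of_not_mem (t : Int) (e : Nat) (l : List Int) (h : t ∉ l) :
    eraseN t e l = l := by
  induction e with
  | zero => rfl
  | succ e ih => rw [eraseN, List.erase_of_not_mem h, ih]

-- rloop on a run of e copies of v whose target is v itself: pairs them up
theorem rloop_rep_self (v : Int) (hv : PySem.Int.floordiv (v * 4) 3 = v) :
    ∀ (e : Nat) (r₂ disc : List Int), v ∉ r₂ →
    rloop (List.replicate e v ++ r₂) disc = rloop r₂ (disc ++ List.replicate ((e + 1) / 2) v) := by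
  intro e
  induction e using Nat.strong_induction_on with
  | _ e ih =>
      intro r₂ disc hv2
      match e with
      | 0 => simp
      | 1 =>
          rw [List.replicate_one, List.cons_append, List.nil_append, rloop, hv,
            List.erase_of_not_mem hv2]
      | e + 2 =>
          rw [show List.replicate (e + 2) v = v :: v :: List.replicate e v by
              simp [List.replicate_succ],
            List.cons_append, rloop, hv, List.cons_append, List.erase_cons_head,
            ih e (by omega) r₂ (disc ++ [v]) hv2]
          congr 1
          rw [List.append_assoc]
          congr 1
          rw [show (e + 2 + 1) / 2 = ((e + 1) / 2) + 1 by omega, List.replicate_succ]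
          rfl

-- rloop on a run of e copies of v with target t ≠ v: emits the run, erases up to e copies of t
theorem rloop_rep_ne (v t : Int) (ht : PySem.Int.floordiv (v * 4) 3 = t) (hne : t ≠ v) :
    ∀ (e : Nat) (r₂ disc : List Int), v ∉ r₂ →
    rloop (List.replicate e v ++ r₂) disc = rloop (eraseN t e r₂) (disc ++ List.replicate e v) := by
  intro e
  induction e with
  | zero => simp [eraseN]
  | succ e ih =>
      intro r₂ disc hv2
      rw [List.replicate_succ, List.cons_append, rloop, ht,
        List.erase_append_right _ (by simp [hne]),
        ih (r₂.erase t) (disc ++ [v]) (fun h => hv2 (List.mem_of_mem_erase h))]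
      rw [eraseN, List.append_assoc]
      rfl

-- rleCount is the length of the maximal leading run
theorem rleCount_take (v : Int) (xs : List Int) :
    xs.take (rleCount v xs) = List.replicate (rleCount v xs) v := by
  induction xs with
  | nil => rfl
  | cons x xs ih =>
      rw [rleCount]
      by_cases hx : x = v
      · simp only [hx, beq_self_eq_true, if_true]
        rw [List.take_succ_cons, ih, List.replicate_succ]
      · simp [hx]

theorem rleCount_drop_head (v : Int) (xs : List Int) :
    ∀ h d', xs.drop (rleCount v xs) = h :: d' → h ≠ v := by
  induction xs with
  | nil => intro h d' hc; simp at hc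
  | cons x xs ih =>
      intro h d' hc
      rw [rleCount] at hc
      by_cases hx : x = v
      · simp only [hx, beq_self_eq_true, if_true] at hc
        rw [List.drop_succ_cons] at hc
        exact ih h d' hc
      · simp only [beq_iff_eq, hx, if_false, List.drop_zero] at hc
        cases hc
        exact hx

theorem expand_rle (xs : List Int) : expand (rle xs) = xs := by
  induction xs using rle.induct with
  | case1 => rw [rle]; rfl
  | case2 v xs ih =>
      rw [rle, expand, Int.toNat_natCast, List.replicate_succ, ih, ← rleCount_take v xs,
        List.cons_append, List.take_append_drop]

theorem mem_expand (u : Int) (bs : List (Int × Int)) (h : u ∈ expand bs) :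
    ∃ p ∈ bs, u = p.1 := by
  induction bs with
  | nil => simp [expand] at h
  | cons p bs ih =>
      obtain ⟨v, c⟩ := p
      rw [expand, List.mem_append] at h
      rcases h with h | h
      · refine ⟨(v, c), List.mem_cons_self, ?_⟩
        exact List.eq_of_mem_replicate h
      · obtain ⟨q, hq, he⟩ := ih h
        exact ⟨q, List.mem_cons_of_mem _ hq, he⟩

theorem mem_rle_fst (xs : List Int) (p : Int × Int) (hp : p ∈ rle xs) : p.1 ∈ xs := by
  induction xs using rle.induct with
  | case1 => rw [rle] at hp; simp at hp
  | case2 v xs ih =>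
      rw [rle] at hp
      rcases List.mem_cons.mp hp with h | h
      · subst h; exact List.mem_cons_self
      · exact List.mem_cons_of_mem _ ((List.drop_sublist _ _).mem (ih h))

theorem rle_snd_pos (xs : List Int) (p : Int × Int) (hp : p ∈ rle xs) : 1 ≤ p.2 := by
  induction xs using rle.induct with
  | case1 => rw [rle] at hp; simp at hp
  | case2 v xs ih =>
      rw [rle] at hp
      rcases List.mem_cons.mp hp with h | h
      · subst h
        simp only
        omega
      · exact ih h

theorem rle_pairwise (xs : List Int) (hs : xs.Pairwise (· ≤ ·)) :
    (rle xs).Pairwise (fun a b => a.1 < b.1) := by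
  induction xs using rle.induct with
  | case1 => rw [rle]; exact List.Pairwise.nil
  | case2 v xs ih =>
      rw [rle]
      have hd : (xs.drop (rleCount v xs)).Pairwise (· ≤ ·) :=
        List.Pairwise.sublist (List.drop_sublist _ _) hs.of_cons
      refine List.Pairwise.cons ?_ (ih hd)
      intro p hp
      have hp1 : p.1 ∈ xs.drop (rleCount v xs) := mem_rle_fst _ _ hp
      cases hdrop : xs.drop (rleCount v xs) with
      | nil => rw [hdrop] at hp1; simp at hp1
      | cons h d' =>
          have hhv : h ≠ v := rleCount_drop_head v xs h d' hdrop
          have hhx : h ∈ xs := (List.drop_sublist _ _).mem (by rw [hdrop]; exact List.mem_cons_self)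
          have hvh : v ≤ h := List.rel_of_pairwise_cons hs hhx
          have hvh' : v < h := lt_of_le_of_ne hvh (Ne.symm hhv)
          rw [hdrop] at hp1 hd
          rcases List.mem_cons.mp hp1 with h1 | h1
          · omega
          · have := List.rel_of_pairwise_cons hd h1
            omega

-- getD after building the dict by the insertion loop
theorem getD_foldl_ins_not_mem (bs : List (Int × Int)) (d : PySem.Dict Int Int) (u : Int)
    (hu : u ∉ bs.map Prod.fst) :
    (bs.foldl (fun d p => d.insert p.1 p.2) d).getD u 0 = d.getD u 0 := by
  induction bs generalizing d with
  | nil => rfl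
  | cons p bs ih =>
      simp only [List.map_cons, List.mem_cons, not_or] at hu
      rw [List.foldl_cons, ih _ hu.2, PySem.Dict.getD_insert, if_neg hu.1]

theorem getD_foldl_ins_mem (bs : List (Int × Int)) (d : PySem.Dict Int Int) (v c : Int)
    (hnd : (bs.map Prod.fst).Nodup) (hmem : (v, c) ∈ bs) :
    (bs.foldl (fun d p => d.insert p.1 p.2) d).getD v 0 = c := by
  induction bs generalizing d with
  | nil => simp at hmem
  | cons p bs ih =>
      rw [List.map_cons, List.nodup_cons] at hnd
      rw [List.foldl_cons]
      rcases List.mem_cons.mp hmem with h | h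
      · subst h
        rw [getD_foldl_ins_not_mem _ _ _ hnd.1]
        exact PySem.Dict.getD_insert_self _ _ _ _
      · exact ih _ hnd.2 h

-- count of a block value in the expansion of a strictly-increasing block list
theorem expand_count_mem (bs : List (Int × Int)) (hp : bs.Pairwise (fun a b => a.1 < b.1))
    (v c : Int) (hmem : (v, c) ∈ bs) : (expand bs).count v = c.toNat := by
  induction bs with
  | nil => simp at hmem
  | cons q bs ih =>
      obtain ⟨w, e⟩ := q
      rw [expand, List.count_append, List.count_replicate]
      rcases List.mem_cons.mp hmem with h | h
      · injection h with h1 h2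
        subst h1; subst h2
        have hz : (expand bs).count v = 0 := by
          rw [List.count_eq_zero]
          intro hmemv
          obtain ⟨q, hq, he⟩ := mem_expand v bs hmemv
          have := List.rel_of_pairwise_cons hp hq
          simp only at this
          omega
        simp [hz]
      · have hvw : w < v := by
          have := List.rel_of_pairwise_cons hp h
          simpa using this
        rw [ih hp.of_cons h]
        have hne : v ≠ w := by omega
        simp [Ne.symm hne]

theorem expand_count_not_mem (bs : List (Int × Int)) (u : Int)
    (hu : u ∉ bs.map Prod.fst) : (expand bs).count u = 0 := by
  rw [List.count_eq_zero]
  intro hm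
  obtain ⟨q, hq, he⟩ := mem_expand u bs hm
  exact hu (he ▸ List.mem_map_of_mem hq)

-- the main correspondence: the block loop equals the list-removal model
theorem altLoop_eq_rloop (bs : List (Int × Int)) :
    ∀ (rem : PySem.Dict Int Int) (rlist disc : List Int),
    bs.Pairwise (fun a b => a.1 < b.1) →
    rlist.Sublist (expand bs) →
    (∀ u, rem.getD u 0 = (rlist.count u : Int)) →
    altLoop rem disc bs = rloop rlist disc := by
  induction bs with
  | nil =>
      intro rem rlist disc _ hsub _
      rw [List.sublist_nil.mp hsub]
      simp [altLoop, rloop]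
  | cons q bs ih =>
      obtain ⟨v, c⟩ := q
      intro rem rlist disc hp hsub hrem
      have hvE : v ∉ expand bs := by
        intro h
        obtain ⟨p, hpm, he⟩ := mem_expand v bs h
        have := List.rel_of_pairwise_cons hp hpm
        simp only at this
        omega
      rw [expand] at hsub
      obtain ⟨r₁, r₂, hr, hr1, hr2⟩ := List.sublist_append_iff.mp hsub
      obtain ⟨e, _, hrep⟩ := List.sublist_replicate_iff.mp hr1
      subst hrep
      have hvr2 : v ∉ r₂ := fun h => hvE (hr2.mem h)
      have hcountv : rlist.count v = e := by
        rw [hr, List.count_append, List.count_replicate, List.count_eq_zero.mpr hvr2]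
        simp
      have hcount_ne : ∀ u, u ≠ v → rlist.count u = r₂.count u := by
        intro u hu
        rw [hr, List.count_append, List.count_replicate]
        simp [Ne.symm hu]
      simp only [altLoop]
      by_cases he0 : e = 0
      · subst he0
        rw [if_pos (by simp [hrem v, hcountv])]
        have hr' : rlist = r₂ := by simpa using hr
        subst hr'
        exact ih rem rlist disc hp.of_cons hr2 hrem
      · rw [if_neg (by simp [hrem v, hcountv]; omega)]
        rw [hr]
        have hrem1 : ∀ u, (rem.insert v 0).getD u 0 = (r₂.count u : Int) := by
          intro u
          rw [PySem.Dict.getD_insert]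
          by_cases hu : u = v
          · subst hu
            simp [List.count_eq_zero.mpr hvr2]
          · rw [if_neg hu, hrem u, hcount_ne u hu]
        by_cases ht : PySem.Int.floordiv (v * 4) 3 = v
        · rw [if_pos (by simp only [beq_iff_eq]; exact ht)]
          rw [rloop_rep_self v ht e r₂ disc hvr2]
          have harg : (PySem.Int.floordiv (rem.getD v 0 + 1) 2).toNat = (e + 1) / 2 := by
            rw [hrem v, hcountv, PySem.Int.floordiv_eq_ediv_of_pos (by norm_num)]
            omega
          rw [harg]
          exact ih _ _ _ hp.of_cons hr2 hrem1
        · rw [if_neg (by simp only [beq_iff_eq]; exact ht)]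
          set t := PySem.Int.floordiv (v * 4) 3 with htdef
          rw [rloop_rep_ne v t rfl ht e r₂ disc hvr2]
          have hdisc : disc ++ List.replicate (rem.getD v 0).toNat v =
              disc ++ List.replicate e v := by
            rw [hrem v, hcountv]; simp
          rw [hdisc]
          have hrt : (rem.insert v 0).getD t 0 = (r₂.count t : Int) := hrem1 t
          by_cases htm : t ∈ r₂
          · have hpos : 0 < r₂.count t := List.count_pos_iff.mpr htm
            rw [if_pos (by rw [hrt]; exact_mod_cast hpos)]
            apply ih _ _ _ hp.of_cons ((eraseN_sublist t e r₂).trans hr2)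
            intro u
            rw [PySem.Dict.getD_insert]
            by_cases hu : u = t
            · subst hu
              rw [if_pos rfl, eraseN_count_self, hrt, hrem v, hcountv]
              omega
            · rw [if_neg hu, hrem1 u, eraseN_count_ne t u hu]
          · rw [if_neg (by rw [hrt, List.count_eq_zero.mpr htm]; simp)]
            rw [eraseN_of_not_mem t e r₂ htm]
            exact ih _ _ _ hp.of_cons hr2 hrem1

-- ===== VERDICT (by name: the statement is the Claim_ definition above) =====
theorem solve_spec : Claim_equal_solve := by
  intro N cost _ hpre
  unfold Pre_solve at hpre
  unfold Spec_solve
  simp only [solve, solve_alt]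
  have hcslen : (PySem.List.sorted cost (fun x => x) false).length = cost.length :=
    PySem.List.length_sorted _ _ _
  set cs := PySem.List.sorted cost (fun x => x) false with hcsdef
  set n2 : Nat := (2 * N).toNat with hn2def
  have hn2 : n2 ≤ cs.length := by omega
  have hitems : (PySem.List.pyRange 0 (2 * N) 1).map (fun i => PySem.List.pyGetD cs i 0)
      = cs.take n2 := by
    apply List.ext_getElem
    · rw [List.length_map, PySem.List.length_pyRange_one, List.length_take]
      omega
    · intro j h1 h2
      rw [List.length_map, PySem.List.length_pyRange_one] at h1
      have hj : j < cs.length := by omega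
      simp only [List.getElem_map, PySem.List.getElem_pyRange_one, List.getElem_take,
        zero_add]
      simp [List.getElem?_eq_getElem hj]
  set blocks := rle (cs.take n2) with hblocks
  have hsorted : (cs.take n2).Pairwise (· ≤ ·) :=
    List.Pairwise.sublist (List.take_sublist _ _) (PySem.List.sorted_pairwise cost (fun x => x))
  have hbp : blocks.Pairwise (fun a b => a.1 < b.1) := rle_pairwise _ hsorted
  have hexp : expand blocks = cs.take n2 := expand_rle _
  have hnd : (blocks.map Prod.fst).Nodup := by
    rw [List.nodup_iff_pairwise_ne, List.pairwise_map]
    exact hbp.imp (fun h => ne_of_lt h)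
  have hrem : ∀ u, (blocks.foldl (fun d p => d.insert p.1 p.2) PySem.Dict.empty).getD u 0 =
      ((cs.take n2).count u : Int) := by
    intro u
    by_cases hu : u ∈ blocks.map Prod.fst
    · obtain ⟨p, hpm, hpe⟩ := List.mem_map.mp hu
      obtain ⟨w, c⟩ := p
      simp only at hpe
      rw [← hpe]
      rw [getD_foldl_ins_mem blocks _ w c hnd hpm]
      have hcnt : (expand blocks).count w = c.toNat := expand_count_mem blocks hbp w c hpm
      rw [hexp] at hcnt
      rw [hcnt]
      have hpm' : (w, c) ∈ rle (cs.take n2) := hblocks ▸ hpm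
      have h1 : (1 : Int) ≤ c := rle_snd_pos _ _ hpm'
      omega
    · rw [getD_foldl_ins_not_mem blocks _ u hu, ← hexp, expand_count_not_mem blocks u hu]
      simp
  have hB : altLoop (blocks.foldl (fun d p => d.insert p.1 p.2) PySem.Dict.empty) [] blocks =
      rloop (cs.take n2) [] := by
    rw [altLoop_eq_rloop blocks _ (cs.take n2) [] hbp (hexp ▸ List.Sublist.refl _) hrem]
  rw [hitems, hB]
  -- A side
  by_cases hN : 0 ≤ N * 2
  · have hcast : ((n2 : Nat) : Int) = N * 2 := by omega
    have hvis : ((PySem.List.pyRange 0 (N * 2) 1).map (fun _ => false)).length = n2 := by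
      rw [List.length_map, PySem.List.length_pyRange_one]; omega
    have hvfalse : ∀ b ∈ (PySem.List.pyRange 0 (N * 2) 1).map (fun _ => false), b = false := by
      intro b hb
      simp only [List.mem_map] at hb
      obtain ⟨_, _, h⟩ := hb
      exact h.symm
    have hA : solveLoop cs (N * 2) (PySem.List.pyRange 0 (N * 2) 1)
        ((PySem.List.pyRange 0 (N * 2) 1).map (fun _ => false)) [] =
        mloop ((cs.take n2).zip ((PySem.List.pyRange 0 (N * 2) 1).map (fun _ => false))) [] := by
      have h := solveLoop_eq_mloop cs n2 hn2 n2 0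
        ((PySem.List.pyRange 0 (N * 2) 1).map (fun _ => false)) [] (by omega) hvis
        (fun j hj => absurd hj (Nat.not_lt_zero j))
      rw [Nat.cast_zero, hcast] at h
      simpa using h
    rw [hA, mloop_eq_rloop, restOf_zip_false _ _ hvfalse, hvis,
      List.take_of_length_le (le_of_eq (by simp [hn2]))]
  · have hz : n2 = 0 := by omega
    rw [PySem.List.pyRange_one_eq_nil (show (N * 2 : Int) ≤ 0 by omega), hz]
    simp [solveLoop, rloop]
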